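-- pv_equiv track=rewrite | github.com/pypi-data/pypi-mirror-84 | packages/tinycss2/tinycss2-1.1.0-py3-none-any.whl/tinycss2/serializer.py | serialize_string_value
-- ===== SOURCE A (Python) =====
-- def serialize_string_value(value):
--     return ''.join(
--         r'\"' if c == '"' else
--         r'\\' if c == '\\' else
--         r'\A ' if c == '\n' else
--         r'\D ' if c == '\r' else
--         r'\C ' if c == '\f' else
--         c
--         for c in value
--     )
-- ===== SOURCE B (Python) =====
-- def serialize_string_value(value):
--     # Backslash first so escapes inserted by later passes are not re-escaped.
--     return (value.replace('\\', '\\\\')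
--                  .replace('"', '\\"')
--                  .replace('\n', '\\A ')
--                  .replace('\r', '\\D ')
--                  .replace('\f', '\\C '))
-- ===== Notes on version B (the rewrite author's own statement) =====
-- stated objective: idiomatic
-- what changed: Replaced the single per-character generator pass with five chained str.replace passes (backslash escaped first so later-inserted backslashes are not re-escaped).
import Mathlib
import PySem

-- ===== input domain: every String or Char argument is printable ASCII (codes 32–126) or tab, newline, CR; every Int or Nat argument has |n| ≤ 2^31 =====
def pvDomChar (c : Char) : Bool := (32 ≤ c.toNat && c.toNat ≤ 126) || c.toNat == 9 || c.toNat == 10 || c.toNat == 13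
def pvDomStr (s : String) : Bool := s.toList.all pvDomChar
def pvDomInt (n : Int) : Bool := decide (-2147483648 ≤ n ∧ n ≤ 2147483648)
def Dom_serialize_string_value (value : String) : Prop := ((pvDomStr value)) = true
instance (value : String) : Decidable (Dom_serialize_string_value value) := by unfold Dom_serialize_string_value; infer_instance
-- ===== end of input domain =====

-- B replaces A's single per-character generator pass by five chained str.replace passes
-- (backslash first), a more idiomatic decomposition; return value proved identical.

-- ===== PORT A =====
def serialize_string_value (value : String) : String :=
  PySem.Str.join "" (value.toList.map (fun c =>
    if c = '"' then "\\\""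
    else if c = '\\' then "\\\\"
    else if c = '\n' then "\\A "
    else if c = '\r' then "\\D "
    else if c = '\x0c' then "\\C "
    else String.ofList [c]))

-- ===== PORT B =====
def serialize_string_value_alt (value : String) : String :=
  PySem.Str.replace
    (PySem.Str.replace
      (PySem.Str.replace
        (PySem.Str.replace
          (PySem.Str.replace value "\\" "\\\\")
          "\"" "\\\"")
        "\n" "\\A ")
      "\r" "\\D ")
    "\x0c" "\\C "

-- ===== PRECONDITION & SPEC =====
def Spec_serialize_string_value (value : String) (out : String) : Prop := out = serialize_string_value_alt value
instance (value : String) (out : String) : Decidable (Spec_serialize_string_value value out) := by unfold Spec_serialize_string_value; infer_instance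

-- ===== CLAIM (what is proved, stated in full; the proofs are below) =====
def Claim_equal_serialize_string_value : Prop := ∀ (value : String), Dom_serialize_string_value value → Spec_serialize_string_value value (serialize_string_value value)

-- ===== LEMMAS AND PROOFS =====

-- The inner worker of PySem.Chars.replace, specialised to a one-character pattern, is a flatMap.
lemma replace_go_single (c : Char) (new : List Char) :
    ∀ (l acc : List Char) (fuel : Nat), l.length ≤ fuel →
      PySem.Chars.replace.go [c] new fuel l acc
        = acc.reverse ++ l.flatMap (fun ch => if ch = c then new else [ch]) := by
  intro l
  induction l with
  | nil => intro acc fuel _; cases fuel <;> simp [PySem.Chars.replace.go]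
  | cons h t ih =>
    intro acc fuel hf
    cases fuel with
    | zero => simp at hf
    | succ n =>
      simp only [PySem.Chars.replace.go]
      by_cases hc : h = c
      · subst hc
        have : List.isPrefixOf [h] (h :: t) = true := by simp [List.isPrefixOf]
        rw [if_pos this]
        simp only [List.length_cons, List.length_nil, Nat.zero_add, List.drop_succ_cons,
          List.drop_zero]
        rw [ih (new.reverse ++ acc) n (by simpa using Nat.le_of_succ_le_succ hf)]
        simp
      · have : List.isPrefixOf [c] (h :: t) = false := by
          simp [List.isPrefixOf]; exact fun hh => hc hh.symm
        rw [if_neg (by simp [this])]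
        rw [ih (h :: acc) n (by simpa using Nat.le_of_succ_le_succ hf)]
        simp [hc]

-- Replacing a one-character pattern is a per-character flatMap.
lemma replace_single (s : List Char) (c : Char) (new : List Char) :
    PySem.Chars.replace s [c] new = s.flatMap (fun ch => if ch = c then new else [ch]) := by
  rw [PySem.Chars.replace]
  simp only [List.isEmpty_cons, Bool.false_eq_true, if_false]
  simpa using replace_go_single c new s [] s.length le_rfl

-- ''.join on a list of pieces is flatten on the character side.
lemma join_nil_flatten (xss : List (List Char)) : PySem.Chars.join [] xss = xss.flatten := by
  induction xss with
  | nil => rfl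
  | cons x xs ih =>
    cases xs with
    | nil => simp [PySem.Chars.join, List.intercalate]
    | cons y ys =>
      simp only [PySem.Chars.join, List.intercalate, List.intersperse] at *
      simpa using ih

-- ===== VERDICT (by name: the statement is the Claim_ definition above) =====
theorem serialize_string_value_spec : Claim_equal_serialize_string_value := by
  intro value _
  unfold Spec_serialize_string_value
  apply String.ext  -- equality of the underlying character lists suffices
  show (serialize_string_value value).toList = (serialize_string_value_alt value).toList
  unfold serialize_string_value serialize_string_value_alt
  rw [PySem.Str.toList_join]
  simp only [PySem.Str.toList_replace]
  have e0 : "".toList = ([] : List Char) := rfl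
  have e1 : "\\".toList = ['\\'] := rfl
  have e2 : "\"".toList = ['"'] := rfl
  have e3 : "\n".toList = ['\n'] := rfl
  have e4 : "\x0d".toList = ['\x0d'] := rfl
  have e5 : "\x0c".toList = ['\x0c'] := rfl
  rw [e0, e1, e2, e3, e4, e5]
  rw [replace_single, replace_single, replace_single, replace_single, replace_single,
    List.flatMap_assoc, List.flatMap_assoc, List.flatMap_assoc, List.flatMap_assoc,
    join_nil_flatten, List.map_map]
  rw [← List.flatMap_def]
  refine List.flatMap_congr (fun c _ => ?_)
  by_cases h1 : c = '"'
  · subst h1; rfl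
  by_cases h2 : c = '\\'
  · subst h2; rfl
  by_cases h3 : c = '\n'
  · subst h3; rfl
  by_cases h4 : c = '\x0d'
  · subst h4; rfl
  by_cases h5 : c = '\x0c'
  · subst h5; rfl
  simp [h1, h2, h3, h4, h5, String.toList_ofList]
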